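-- pv_equiv track=rewrite | github.com/tile-ai/TileOPs | benchmarks/select_nightly_benchmarks.py | select_benchmarks
-- ===== SOURCE A (Python) =====
-- def select_benchmarks(
--     all_files: list[str],
--     history: dict[str, str],
--     n: int,
-- ) -> list[str]:
--     """Select up to n benchmark files to run.
--
--     Priority:
--       1. Files not in history (never run) — alphabetical order.
--       2. Files with oldest last_run date — ascending by date.
--     """
--     never_run = [f for f in all_files if f not in history]
--     previously_run = [f for f in all_files if f in history]
--
--     # Sort previously-run by last_run date ascending (oldest first)
--     previously_run.sort(key=lambda f: history[f])
--
--     selected: list[str] = []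
--     # Phase 1: never-run files
--     selected.extend(never_run[:n])
--     # Phase 2: fill with oldest-run files
--     remaining = n - len(selected)
--     if remaining > 0:
--         selected.extend(previously_run[:remaining])
--
--     return selected
-- ===== SOURCE B (Python) =====
-- def select_benchmarks(
--     all_files: list[str],
--     history: dict[str, str],
--     n: int,
-- ) -> list[str]:
--     """Select up to n benchmark files: never-run first, then oldest last_run.
--
--     One stable sort by a composite key replaces A's partition + sort + two slices:
--     files absent from history sort first (key (False, "")), the rest ascend by date;
--     stability preserves all_files order within each group.
--     """
--     order = sorted(all_files, key=lambda f: (f in history, history.get(f, "")))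
--     return order[:n]
-- ===== Notes on version B (the rewrite author's own statement) =====
-- stated objective: simpler
-- what changed: One stable sort of all_files by the composite key (f in history, history.get(f, '')) plus a single [:n] slice replaces A's partition into two lists, separate date sort, and two-phase slicing/extend.
-- outside the precondition, e.g. on select_benchmarks(['a', 'b', 'c'], {'b': '2024'}, -1): A returns ['a'], B returns ['a', 'c']
import Mathlib
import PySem

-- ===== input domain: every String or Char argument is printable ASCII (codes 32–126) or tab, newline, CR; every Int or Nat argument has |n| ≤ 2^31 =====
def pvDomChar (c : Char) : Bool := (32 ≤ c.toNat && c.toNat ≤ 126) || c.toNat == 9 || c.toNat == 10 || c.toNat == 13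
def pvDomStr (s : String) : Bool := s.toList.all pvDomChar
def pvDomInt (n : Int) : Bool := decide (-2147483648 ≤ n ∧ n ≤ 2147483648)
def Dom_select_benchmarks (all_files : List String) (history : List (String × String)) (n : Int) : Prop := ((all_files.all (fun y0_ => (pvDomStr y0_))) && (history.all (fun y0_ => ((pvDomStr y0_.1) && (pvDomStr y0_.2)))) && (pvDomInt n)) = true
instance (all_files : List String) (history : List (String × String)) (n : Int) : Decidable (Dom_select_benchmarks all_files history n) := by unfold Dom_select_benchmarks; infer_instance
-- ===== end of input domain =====

-- B replaces A's partition + separate sort + two-phase slicing by ONE stable sort with a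
-- composite key ((f in history), last_run date) followed by a single [:n] slice: simpler.

-- ===== PORT A =====
-- literal transliteration of A; history[f] inside the sort key is ported as getD with "",
-- exact because the key is only applied to files f with hist.contains f = true.
def select_benchmarks (all_files : List String) (history : List (String × String)) (n : Int) : List String :=
  let hist := PySem.Dict.ofList history
  let never_run := all_files.filter (fun f => !(hist.contains f))
  let previously_run := all_files.filter (fun f => hist.contains f)
  let previously_run_sorted := PySem.List.sorted previously_run (fun f => hist.getD f "")
  let selected := PySem.List.slice never_run none (some n)
  let remaining := n - (selected.length : Int)
  if remaining > 0 then
    selected ++ PySem.List.slice previously_run_sorted none (some remaining)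
  else
    selected

-- ===== PORT B =====
def select_benchmarks_alt (all_files : List String) (history : List (String × String)) (n : Int) : List String :=
  let hist := PySem.Dict.ofList history
  let order := PySem.List.sorted2 all_files (fun f => hist.contains f) (fun f => hist.getD f "")
  PySem.List.slice order none (some n)

-- ===== PRECONDITION & SPEC =====
-- Pre_ excludes only negative n of magnitude below len(all_files) (-len < n < 0), on which A
-- still returns: its value there (the never-run list with the last |n| entries chopped off by
-- Python's negative slice) is an artefact of slicing with a count outside the natural domain
-- of "select up to n" (when n ≤ -len both slices are empty, and when no file is in history the
-- sort leaves the order untouched, so those negative-n inputs stay inside the claim).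
def Pre_select_benchmarks (all_files : List String) (history : List (String × String)) (n : Int) : Prop := 0 ≤ n ∨ (all_files.length : Int) ≤ -n ∨ ∀ f ∈ all_files, (PySem.Dict.ofList history).contains f = false
instance (all_files : List String) (history : List (String × String)) (n : Int) : Decidable (Pre_select_benchmarks all_files history n) := by unfold Pre_select_benchmarks; infer_instance
def pvWitness_select_benchmarks : List String × (List (String × String)) × Int :=
  (["a", "b", "c"], [("b", "2024-01-02"), ("c", "2024-01-01")], 2)
def Spec_select_benchmarks (all_files : List String) (history : List (String × String)) (n : Int) (out : List String) : Prop := out = select_benchmarks_alt all_files history n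
instance (all_files : List String) (history : List (String × String)) (n : Int) (out : List String) : Decidable (Spec_select_benchmarks all_files history n out) := by unfold Spec_select_benchmarks; infer_instance

-- ===== CLAIM (what is proved, stated in full; the proofs are below) =====
def Claim_equal_select_benchmarks : Prop := ∀ (all_files : List String) (history : List (String × String)) (n : Int), Dom_select_benchmarks all_files history n → Pre_select_benchmarks all_files history n → Spec_select_benchmarks all_files history n (select_benchmarks all_files history n)

-- ===== LEMMAS AND PROOFS =====

-- insertBy passes over a block on which `before` is everywhere false
theorem insertBy_append_left {α : Type} (before : α → α → Bool) (x : α) (A S : List α)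
    (h : ∀ y ∈ A, before x y = false) :
    PySem.List.insertBy before x (A ++ S) = A ++ PySem.List.insertBy before x S := by
  induction A with
  | nil => rfl
  | cons a A ih =>
    simp only [List.cons_append, PySem.List.insertBy]
    rw [h a (by simp)]
    simp only [Bool.false_eq_true, if_false, List.cons.injEq, true_and]
    exact ih (fun y hy => h y (by simp [hy]))

-- insertBy at the front of a block on which `before` is everywhere true
theorem insertBy_front {α : Type} (before : α → α → Bool) (x : α) (S : List α)
    (h : ∀ y ∈ S, before x y = true) :
    PySem.List.insertBy before x S = x :: S := by
  cases S with
  | nil => rfl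
  | cons s S => simp only [PySem.List.insertBy, h s (by simp), if_true]

-- insertBy only looks at `before x ·` on elements of the list
theorem insertBy_congr {α : Type} (b1 b2 : α → α → Bool) (x : α) (S : List α)
    (h : ∀ y ∈ S, b1 x y = b2 x y) :
    PySem.List.insertBy b1 x S = PySem.List.insertBy b2 x S := by
  induction S with
  | nil => rfl
  | cons s S ih =>
    simp only [PySem.List.insertBy, h s (by simp)]
    rw [ih (fun y hy => h y (by simp [hy]))]

-- the heart: a stable sort by the composite key (p f, k2 f) — where k2 is constant "" on the
-- p = false group — is the p = false elements in order, followed by the p = true elements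
-- sorted by k2 alone.
theorem sorted2_partition (xs : List String) (p : String → Bool) (k2 : String → String)
    (hk2 : ∀ x, p x = false → k2 x = "") :
    PySem.List.sorted2 xs p k2
      = xs.filter (fun x => !p x) ++ PySem.List.sorted (xs.filter p) k2 := by
  induction xs using List.reverseRecOn with
  | nil => rfl
  | append_singleton xs x ih =>
    have hstep : PySem.List.sorted2 (xs ++ [x]) p k2
        = PySem.List.insertBy
            (fun a b => decide (p a < p b) || !decide (p b < p a) && decide (k2 a < k2 b))
            x (PySem.List.sorted2 xs p k2) := by
      simp [PySem.List.sorted2, List.foldl_append]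
    set lt : String → String → Bool :=
      fun a b => decide (p a < p b) || !decide (p b < p a) && decide (k2 a < k2 b) with hlt
    have hmemS : ∀ y ∈ PySem.List.sorted (xs.filter p) k2, p y = true := by
      intro y hy
      have : y ∈ xs.filter p := (PySem.List.mem_sorted _ _ _ _).1 hy
      exact (List.mem_filter.1 this).2
    rw [hstep, ih]
    by_cases hpx : p x = true
    · -- previously run: passes the never-run block, inserted by k2 into the sorted block
      rw [insertBy_append_left lt x _ _ (by
        intro y hy
        have hpy : p y = false := by
          have := (List.mem_filter.1 hy).2
          simpa using this
        simp [hlt, hpx, hpy])]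
      rw [insertBy_congr lt (fun a b => decide (k2 a < k2 b)) x _ (by
        intro y hy
        simp [hlt, hpx, hmemS y hy])]
      rw [PySem.List.sorted_eq_foldl_insertBy, PySem.List.sorted_eq_foldl_insertBy,
        List.filter_append, List.filter_append]
      simp [hpx, List.foldl_append]
    · -- never run: passes the never-run block (both keys tie), goes before the sorted block
      have hpx' : p x = false := by simpa using hpx
      rw [insertBy_append_left lt x _ _ (by
        intro y hy
        have hpy : p y = false := by
          have := (List.mem_filter.1 hy).2
          simpa using this
        simp [hlt, hpx', hpy, hk2 x hpx', hk2 y hpy])]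
      rw [insertBy_front lt x _ (by
        intro y hy
        simp [hlt, hpx', hmemS y hy])]
      rw [List.filter_append, List.filter_append]
      simp [hpx']

-- ===== VERDICT (by name: the statement is the Claim_ definition above) =====
theorem select_benchmarks_spec : Claim_equal_select_benchmarks := by
  intro all_files history n _hdom hn
  unfold Spec_select_benchmarks select_benchmarks select_benchmarks_alt
  dsimp only
  by_cases hn0 : (0 : Int) ≤ n
  case neg =>
    have hn' := hn
    unfold Pre_select_benchmarks at hn'
    by_cases hall : ∀ f ∈ all_files, (PySem.Dict.ofList history).contains f = false
    · -- n < 0 but no file is in history: the sort leaves all_files untouched and the filter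
      -- keeps everything, so both sides are the same slice all_files[:n]
      have hfilt : all_files.filter (fun f => !(PySem.Dict.ofList history).contains f) = all_files :=
        List.filter_eq_self.2 (by intro a ha; simp [hall a ha])
      have hfilt2 : all_files.filter (fun f => (PySem.Dict.ofList history).contains f) = [] :=
        List.filter_eq_nil_iff.2 (by intro a ha; simp [hall a ha])
      have hsorted : PySem.List.sorted2 all_files
          (fun f => (PySem.Dict.ofList history).contains f)
          (fun f => (PySem.Dict.ofList history).getD f "") = all_files := by
        rw [sorted2_partition _ _ _ (fun x hx => PySem.Dict.getD_of_not_contains _ _ hx),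
          hfilt, hfilt2]
        simp [PySem.List.sorted]
      rw [hfilt, hsorted]
      rw [if_neg (by
        have := Int.natCast_nonneg ((PySem.List.slice all_files none (some n)).length)
        omega)]
    -- n < 0 with |n| ≥ len(all_files): every slice here is empty, both sides return []
    have hlen : (all_files.length : Int) ≤ -n := by
      rcases hn' with h | h | h
      · exact absurd h hn0
      · exact h
      · exact absurd h hall
    obtain ⟨k, hkpos, hnk⟩ : ∃ k : Nat, 0 < k ∧ n = -(k : Int) :=
      ⟨(-n).toNat, by omega, by omega⟩
    have hklen : all_files.length ≤ k := by omega
    have hlen1 : (all_files.filter (fun f => !(PySem.Dict.ofList history).contains f)).length ≤ k :=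
      le_trans (List.length_filter_le _ _) hklen
    have hlen2 : (PySem.List.sorted2 all_files (fun f => (PySem.Dict.ofList history).contains f)
        (fun f => (PySem.Dict.ofList history).getD f "")).length ≤ k := by
      rw [(PySem.List.sorted2_perm _ _ _ _).length_eq]; exact hklen
    rw [hnk, PySem.List.slice_to_neg_natCast _ _ hkpos, PySem.List.slice_to_neg_natCast _ _ hkpos]
    rw [Nat.sub_eq_zero_of_le hlen1, Nat.sub_eq_zero_of_le hlen2]
    simp only [List.take_zero, List.length_nil, Nat.cast_zero, sub_zero]
    rw [if_neg (by omega)]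
  have hn := hn0
  set hist := PySem.Dict.ofList history with hhist
  set p : String → Bool := fun f => hist.contains f with hp
  set k2 : String → String := fun f => hist.getD f "" with hk2
  have hconst : ∀ x, p x = false → k2 x = "" :=
    fun x hx => PySem.Dict.getD_of_not_contains _ _ hx
  have hpart := sorted2_partition all_files p k2 hconst
  set A := all_files.filter (fun x => !p x) with hA
  set S := PySem.List.sorted (all_files.filter p) k2 with hS
  rw [hpart]
  have hn' : (0 : Int) ≤ n := hn
  rw [PySem.List.slice_to _ hn', PySem.List.slice_to _ hn',
    List.take_append]
  by_cases hle : n.toNat ≤ A.length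
  · have hlen : (A.take n.toNat).length = n.toNat := by
      simp [List.length_take, Nat.min_eq_left hle]
    have hrem : ¬ (0 < n - ((A.take n.toNat).length : Int)) := by
      rw [hlen]; omega
    rw [if_neg hrem]
    have : n.toNat - A.length = 0 := by omega
    simp [this]
  · push Not at hle
    have htake : A.take n.toNat = A := List.take_of_length_le (by omega)
    have hrem : 0 < n - ((A.take n.toNat).length : Int) := by
      rw [htake]; omega
    rw [if_pos hrem, htake,
      PySem.List.slice_to _ (by omega : (0:Int) ≤ n - (A.length : Int))]
    congr 1
    congr 1
    omega
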